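-- pv_equiv track=rewrite | github.com/aghauss/SkySaver | csv_converter.py | preprocess_flight_data
-- ===== SOURCE A (Python) =====
-- def preprocess_flight_data(data):
--     # Initialize variables
--     preprocessed_data = []
--     temp_group = []
--
--     for entry in data:
--         # Skip entries that start with "null" or are exactly "true"
--         if entry.startswith('null') or entry == 'true':
--             continue
--         # Add the entry to the temporary group
--         temp_group.append(entry)
--         # Check if the temporary group has 5 elements (a complete flight entry)
--         if len(temp_group) == 5:
--             # Extend the preprocessed_data list with this complete flight entry
--             preprocessed_data.extend(temp_group)
--             # Reset the temporary group for the next flight entry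
--             temp_group = []
--
--     # Handle any remaining entries in temp_group if they form a complete flight entry
--     if len(temp_group) == 5:
--         preprocessed_data.extend(temp_group)
--
--     return preprocessed_data
-- ===== SOURCE B (Python) =====
-- def preprocess_flight_data(data):
--     filtered = [e for e in data if not (e.startswith('null') or e == 'true')]
--     return filtered[:len(filtered) - len(filtered) % 5]
-- ===== Notes on version B (the rewrite author's own statement) =====
-- stated objective: simpler
-- what changed: Replaces the running temp_group accumulate/flush loop (and its dead trailing check) with one filter comprehension followed by a closed-form truncation to the largest multiple of five.
import Mathlib
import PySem

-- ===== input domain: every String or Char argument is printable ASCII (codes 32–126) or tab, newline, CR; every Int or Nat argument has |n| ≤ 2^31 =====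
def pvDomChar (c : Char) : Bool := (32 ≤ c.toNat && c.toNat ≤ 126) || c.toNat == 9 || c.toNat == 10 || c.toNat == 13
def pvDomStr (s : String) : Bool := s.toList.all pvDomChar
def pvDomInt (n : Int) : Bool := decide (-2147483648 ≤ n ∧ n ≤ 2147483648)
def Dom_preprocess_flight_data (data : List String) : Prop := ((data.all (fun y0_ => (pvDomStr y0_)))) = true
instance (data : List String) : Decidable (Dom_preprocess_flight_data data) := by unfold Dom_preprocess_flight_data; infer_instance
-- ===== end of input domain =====

-- B is simpler: one filter comprehension, then a closed-form truncation to a multiple of five,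
-- instead of A's running temp_group accumulate/flush loop with its dead trailing check.

-- ===== PORT A =====
-- the skip predicate: entry.startswith('null') or entry == 'true'
def pvSkip (e : String) : Bool :=
  PySem.Str.startswith e "null" || (e == "true")

-- one loop iteration of A over state (preprocessed_data, temp_group)
def pvStepA (st : List String × List String) (entry : String) : List String × List String :=
  if pvSkip entry then st
  else
    let temp' := st.2 ++ [entry]
    if temp'.length == 5 then (st.1 ++ temp', []) else (st.1, temp')

def preprocess_flight_data (data : List String) : List String :=
  let st := data.foldl pvStepA ([], [])
  if st.2.length == 5 then st.1 ++ st.2 else st.1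

-- ===== PORT B =====
def preprocess_flight_data_alt (data : List String) : List String :=
  let filtered := data.filter (fun e => !(pvSkip e))
  PySem.List.slice filtered none (some ((filtered.length : Int) - (filtered.length : Int) % 5))

-- ===== PRECONDITION & SPEC =====
def Spec_preprocess_flight_data (data : List String) (out : List String) : Prop := out = preprocess_flight_data_alt data
instance (data : List String) (out : List String) : Decidable (Spec_preprocess_flight_data data out) := by unfold Spec_preprocess_flight_data; infer_instance

-- ===== CLAIM (what is proved, stated in full; the proofs are below) =====
def Claim_equal_preprocess_flight_data : Prop := ∀ (data : List String), Dom_preprocess_flight_data data → Spec_preprocess_flight_data data (preprocess_flight_data data)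

-- ===== LEMMAS AND PROOFS =====

-- A's loop skips exactly the filtered-out entries: folding over data equals folding over the filtered list
theorem foldA_eq_foldA_filter (data : List String) (st : List String × List String) :
    data.foldl pvStepA st = (data.filter (fun e => !(pvSkip e))).foldl pvStepA st := by
  induction data generalizing st with
  | nil => rfl
  | cons e l ih =>
    by_cases h : pvSkip e
    · simp [h, List.foldl_cons, pvStepA, ih]
    · simp [h, List.foldl_cons, ih]

-- main invariant: starting from (pre, temp) with temp.length < 5, the loop over l produces
-- pre ++ (take of temp++l up to the largest multiple of 5) and the corresponding remainder
theorem foldA_invariant (l : List String) (hl : ∀ e ∈ l, pvSkip e = false)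
    (pre temp : List String) (ht : temp.length < 5) :
    l.foldl pvStepA (pre, temp)
      = (pre ++ (temp ++ l).take ((temp.length + l.length) - (temp.length + l.length) % 5),
         (temp ++ l).drop ((temp.length + l.length) - (temp.length + l.length) % 5)) := by
  induction l generalizing pre temp with
  | nil =>
    have : temp.length % 5 = temp.length := Nat.mod_eq_of_lt ht
    simp [this]
  | cons e l ih =>
    have he : pvSkip e = false := hl e (List.mem_cons_self ..)
    have hl' : ∀ x ∈ l, pvSkip x = false := fun x hx => hl x (List.mem_cons_of_mem _ hx)
    simp only [List.foldl_cons, pvStepA, he, Bool.false_eq_true, if_false]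
    by_cases h5 : (temp ++ [e]).length = 5
    · simp only [h5, beq_self_eq_true, if_true]
      rw [ih hl' (pre ++ (temp ++ [e])) [] (by simp)]
      have hlen : temp.length = 4 := by simpa using h5
      have harith : (temp.length + (e :: l).length) - (temp.length + (e :: l).length) % 5
          = 5 + (l.length - l.length % 5) := by
        rw [hlen]; simp [List.length_cons]; omega
      simp only [List.length_nil, Nat.zero_add, List.nil_append, Prod.mk.injEq]
      constructor
      · rw [harith]
        have hsplit : temp ++ e :: l = (temp ++ [e]) ++ l := by simp
        rw [hsplit, List.take_append]
        simp [List.take_of_length_le, h5]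
      · rw [harith]
        have hsplit : temp ++ e :: l = (temp ++ [e]) ++ l := by simp
        rw [hsplit, List.drop_append]
        simp [h5]
    · have h5' : ((temp ++ [e]).length == 5) = false := by simpa using h5
      simp only [h5', Bool.false_eq_true, if_false]
      rw [ih hl' pre (temp ++ [e]) (by simp at h5 ⊢; omega)]
      have : temp ++ e :: l = (temp ++ [e]) ++ l := by simp
      rw [this]
      have harith : (temp ++ [e]).length + l.length = temp.length + (e :: l).length := by
        simp; omega
      rw [harith]

-- ===== VERDICT (by name: the statement is the Claim_ definition above) =====
theorem preprocess_flight_data_spec : Claim_equal_preprocess_flight_data := by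
  intro data _
  unfold Spec_preprocess_flight_data preprocess_flight_data preprocess_flight_data_alt
  set f := data.filter (fun e => !(pvSkip e)) with hf
  have hmem : ∀ e ∈ f, pvSkip e = false := by
    intro e he; rw [hf] at he; simpa using (List.of_mem_filter he)
  rw [foldA_eq_foldA_filter, ← hf,
    foldA_invariant f hmem [] [] (by simp)]
  have hdroplen : (f.drop (f.length - f.length % 5)).length = f.length % 5 := by
    simp [List.length_drop]; omega
  have hne5 : f.length % 5 ≠ 5 := by omega
  have hcond : ((f.drop (f.length - f.length % 5)).length == 5) = false := by
    simp [hdroplen, hne5]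
  simp only [List.nil_append, List.length_nil, Nat.zero_add, hcond, Bool.false_eq_true, if_false]
  have hc : ((f.length : Int)) % 5 = ((f.length % 5 : Nat) : Int) := (Int.natCast_mod f.length 5).symm
  have hnn : (0 : Int) ≤ (f.length : Int) - (f.length : Int) % 5 := by
    rw [hc]
    have := Nat.mod_le f.length 5
    omega
  rw [PySem.List.slice_to _ hnn]
  congr 1
  have : ((f.length : Int) - (f.length : Int) % 5) = ((f.length - f.length % 5 : Nat) : Int) := by
    rw [hc]
    have := Nat.mod_le f.length 5
    omega
  rw [this]
  simp
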